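-- pv_equiv track=rewrite | github.com/VishwamAI/Generative-Flex | fix_syntax_patterns_final_v78.py | fix_imports
-- ===== SOURCE A (Python) =====
-- def fix_imports(content: str) -> str:
--     """Fix import statement formatting."""
--     lines = content.split('\n')
--     fixed_lines = []
--     import_lines = []
--
--     for line in lines:
--         if line.strip().startswith(('import ', 'from ')):
--             # Skip malformed imports
--             if 'functionality.' in line or 'Class implementing' in line:
--                 continue
--             # Clean up import statement
--             if 'from' in line and 'import' in line:
--                 parts = line.split('import')
--                 if len(parts) == 2:
--                     from_part = parts[0].strip()
--                     import_part = parts[1].strip()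
--                     import_lines.append(f"{from_part} import {import_part}")
--             else:
--                 import_lines.append(line)
--         else:
--             if import_lines:
--                 # Sort and add imports
--                 import_lines.sort()
--                 fixed_lines.extend(import_lines)
--                 import_lines = []
--                 if line.strip():
--                     fixed_lines.append('')
--             fixed_lines.append(line)
--
--     if import_lines:
--         import_lines.sort()
--         fixed_lines.extend(import_lines)
--
--     return '\n'.join(fixed_lines)
-- ===== SOURCE B (Python) =====
-- def fix_imports(content: str) -> str:
--     """Fix import statement formatting (decorate-sort-undecorate rewrite)."""
--     lines = content.split('\n')
--     # Pass 1: decorate every surviving line with a sort key.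
--     # Import lines get (anchor-of-their-run, 1, cleaned text); other lines keep
--     # their own position (i, 0, line).  Anchors of distinct runs never collide
--     # with other keys, so one global stable tuple sort reorders each import run
--     # alphabetically while leaving everything else in place.
--     items = []
--     anchor = None
--     for i, line in enumerate(lines):
--         if line.strip().startswith(('import ', 'from ')):
--             if anchor is None:
--                 anchor = i
--             if 'functionality.' in line or 'Class implementing' in line:
--                 continue
--             if 'from' in line and 'import' in line:
--                 parts = line.split('import')
--                 if len(parts) == 2:
--                     items.append((anchor, 1, f"{parts[0].strip()} import {parts[1].strip()}"))
--             else: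
--                 items.append((anchor, 1, line))
--         else:
--             anchor = None
--             items.append((i, 0, line))
--     items.sort()
--     # Pass 2: undecorate, inserting the single blank line after an import run
--     # when the next kept line is a non-empty non-import line.
--     out = []
--     prev_import = False
--     for _, kind, text in items:
--         if prev_import and kind == 0 and text.strip():
--             out.append('')
--         out.append(text)
--         prev_import = kind == 1
--     return '\n'.join(out)
-- ===== Notes on version B (the rewrite author's own statement) =====
-- stated objective: alternative
-- what changed: Replaces A's sequential buffer-and-flush loop by a decorate-sort-undecorate scheme: one pass tags every kept line with a tuple key (run-anchor index, kind, text), a single global stable tuple sort then reorders each import run alphabetically in place, and a second pass undecorates, inserting the blank separator where an import item is followed by a non-empty non-import item.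
import Mathlib
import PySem

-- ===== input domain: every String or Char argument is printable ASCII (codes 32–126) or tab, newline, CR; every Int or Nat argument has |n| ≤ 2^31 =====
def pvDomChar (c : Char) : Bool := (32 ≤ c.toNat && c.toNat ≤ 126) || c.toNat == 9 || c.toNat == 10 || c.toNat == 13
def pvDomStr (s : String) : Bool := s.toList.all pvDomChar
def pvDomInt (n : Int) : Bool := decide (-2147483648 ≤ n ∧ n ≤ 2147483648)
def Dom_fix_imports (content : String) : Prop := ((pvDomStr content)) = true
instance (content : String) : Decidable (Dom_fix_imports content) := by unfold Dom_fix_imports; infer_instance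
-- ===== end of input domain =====

-- B replaces A's buffer-and-flush loop by decorate / one global stable tuple sort / undecorate; same return value, no speed claim.

-- ===== PORT A =====
-- one loop step of A: state = (fixed_lines, import_lines)
def fixStepA : List String × List String → String → List String × List String :=
  fun st line =>
    if PySem.Str.startswith (PySem.Str.strip line) "import " ||
       PySem.Str.startswith (PySem.Str.strip line) "from " then
      if PySem.Str.isIn "functionality." line || PySem.Str.isIn "Class implementing" line then
        st
      else if PySem.Str.isIn "from" line && PySem.Str.isIn "import" line then
        let parts := (PySem.Str.split? line "import").getD []
        if parts.length == 2 then
          (st.1, st.2 ++ [PySem.Str.strip (parts.getD 0 "") ++ " import " ++ PySem.Str.strip (parts.getD 1 "")])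
        else st
      else
        (st.1, st.2 ++ [line])
    else
      if st.2.isEmpty then
        (st.1 ++ [line], [])
      else
        let fl := st.1 ++ PySem.List.sorted st.2 (fun s => s) false
        let fl := if PySem.Str.strip line == "" then fl else fl ++ [""]
        (fl ++ [line], [])

-- the trailing 'if import_lines: sort; extend'
def finishA (st : List String × List String) : List String :=
  if st.2.isEmpty then st.1 else st.1 ++ PySem.List.sorted st.2 (fun s => s) false

def fix_imports (content : String) : String :=
  let lines := (PySem.Str.split? content "\n").getD []
  PySem.Str.join "\n" (finishA (lines.foldl fixStepA ([], [])))

-- ===== PORT B =====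
-- a decorated line: Python's tuple (anchor, kind, text); ×ₗ so that < / ≤ are Python's tuple comparison
abbrev PvItem : Type := Int ×ₗ Int ×ₗ String

-- pass 1 of Source B: state = (items, anchor); input = (line, i) from enumerate
def pass1step : List PvItem × Option Int → String × Nat → List PvItem × Option Int :=
  fun st li =>
    if PySem.Str.startswith (PySem.Str.strip li.1) "import " ||
       PySem.Str.startswith (PySem.Str.strip li.1) "from " then
      let anchor : Int := match st.2 with | none => (li.2 : Int) | some a => a
      if PySem.Str.isIn "functionality." li.1 || PySem.Str.isIn "Class implementing" li.1 then
        (st.1, some anchor)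
      else if PySem.Str.isIn "from" li.1 && PySem.Str.isIn "import" li.1 then
        let parts := (PySem.Str.split? li.1 "import").getD []
        if parts.length == 2 then
          (st.1 ++ [toLex (anchor, toLex ((1 : Int),
            PySem.Str.strip (parts.getD 0 "") ++ " import " ++ PySem.Str.strip (parts.getD 1 "")))],
           some anchor)
        else (st.1, some anchor)
      else
        (st.1 ++ [toLex (anchor, toLex ((1 : Int), li.1))], some anchor)
    else
      (st.1 ++ [toLex ((li.2 : Int), toLex ((0 : Int), li.1))], none)

-- pass 2 of Source B: state = (out, prev_import)
def pass2step : List String × Bool → PvItem → List String × Bool :=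
  fun st t =>
    let kind := (ofLex (ofLex t).2).1
    let text := (ofLex (ofLex t).2).2
    let out := if st.2 && (kind == 0) && !(PySem.Str.strip text == "") then st.1 ++ [""] else st.1
    (out ++ [text], kind == 1)

def fix_imports_alt (content : String) : String :=
  let lines := (PySem.Str.split? content "\n").getD []
  let items := (lines.zipIdx.foldl pass1step ([], none)).1
  -- items.sort(): Python's stable sort under tuple comparison = PySem.List.sorted with the identity
  -- key at the lexicographic product type (exact: ×ₗ compares componentwise-lexicographically like Python)
  let sortedItems := PySem.List.sorted items (fun t => t) false
  PySem.Str.join "\n" ((sortedItems.foldl pass2step ([], false)).1)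

-- ===== PRECONDITION & SPEC =====
def Spec_fix_imports (content : String) (out : String) : Prop := out = fix_imports_alt content
instance (content : String) (out : String) : Decidable (Spec_fix_imports content out) := by unfold Spec_fix_imports; infer_instance

-- ===== CLAIM (what is proved, stated in full; the proofs are below) =====
def Claim_equal_fix_imports : Prop := ∀ (content : String), Dom_fix_imports content → Spec_fix_imports content (fix_imports content)

-- ===== LEMMAS AND PROOFS =====

def isImportB (line : String) : Bool :=
  PySem.Str.startswith (PySem.Str.strip line) "import " ||
  PySem.Str.startswith (PySem.Str.strip line) "from "

def cleanB (line : String) : Option String :=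
  if PySem.Str.isIn "functionality." line || PySem.Str.isIn "Class implementing" line then
    none
  else if PySem.Str.isIn "from" line && PySem.Str.isIn "import" line then
    let parts := (PySem.Str.split? line "import").getD []
    if parts.length == 2 then
      some (PySem.Str.strip (parts.getD 0 "") ++ " import " ++ PySem.Str.strip (parts.getD 1 ""))
    else none
  else some line

-- maximal runs of import / non-import lines, with their key
def groupRuns : List String → List (Bool × List String)
  | [] => []
  | x :: xs =>
    let k := isImportB x
    (k, x :: xs.takeWhile (fun y => isImportB y == k)) ::
      groupRuns (xs.dropWhile (fun y => isImportB y == k))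
termination_by l => l.length
decreasing_by
  exact Nat.lt_succ_of_le (List.length_dropWhile_le _ _)

-- common middle form: one flush step per run; state = (out, pending)
def stepB : List String × Bool → Bool × List String → List String × Bool :=
  fun st g =>
    if g.1 then
      let cleaned := PySem.List.sorted (g.2.filterMap cleanB) (fun s => s) false
      (st.1 ++ cleaned, !cleaned.isEmpty)
    else
      let out := if st.2 && !(PySem.Str.strip (g.2.headD "") == "") then st.1 ++ [""] else st.1
      (out ++ g.2, false)

-- one A-step on an import line buffers exactly what cleanB keeps
theorem fixStepA_import (fl il : List String) (line : String)
    (h : isImportB line = true) :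
    fixStepA (fl, il) line = (fl, il ++ (cleanB line).toList) := by
  unfold isImportB at h
  unfold fixStepA cleanB
  simp only [h, if_true]
  split_ifs <;> simp_all

-- one A-step on a non-import line flushes the buffer
theorem fixStepA_nonimport (fl il : List String) (line : String)
    (h : isImportB line = false) :
    fixStepA (fl, il) line =
      ((if il.isEmpty then fl
        else fl ++ PySem.List.sorted il (fun s => s) false ++
          (if PySem.Str.strip line == "" then [] else [""])) ++ [line], []) := by
  unfold isImportB at h
  unfold fixStepA
  simp only [Bool.or_eq_false_iff] at h
  simp only [h.1, h.2, Bool.or_self]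
  by_cases h1 : il.isEmpty
  · simp [h1]
  · by_cases h2 : (PySem.Str.strip line == "") = true
    · simp [h1, h2]
    · simp only [Bool.not_eq_true] at h2
      simp [h1, h2, List.append_assoc]

-- an all-import run only grows the buffer
theorem foldl_import_run (g : List String) :
    ∀ fl il, (∀ y ∈ g, isImportB y = true) →
    g.foldl fixStepA (fl, il) = (fl, il ++ g.filterMap cleanB) := by
  induction g with
  | nil => intro fl il _; simp
  | cons y ys ih =>
    intro fl il hall
    have hy : isImportB y = true := hall y (by simp)
    simp only [List.foldl_cons, fixStepA_import fl il y hy]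
    rw [ih fl (il ++ (cleanB y).toList) (fun z hz => hall z (by simp [hz]))]
    cases hcy : cleanB y <;> simp [hcy]

-- an all-non-import run from an empty buffer just copies lines
theorem foldl_nonimport_run (g : List String) :
    ∀ fl, (∀ y ∈ g, isImportB y = false) →
    g.foldl fixStepA (fl, []) = (fl ++ g, []) := by
  induction g with
  | nil => intro fl _; simp
  | cons y ys ih =>
    intro fl hall
    have hy : isImportB y = false := hall y (by simp)
    simp only [List.foldl_cons, fixStepA_nonimport fl [] y hy, List.isEmpty_nil, if_true]
    rw [ih (fl ++ [y]) (fun z hz => hall z (by simp [hz]))]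
    simp

theorem sorted_nil_str : PySem.List.sorted ([] : List String) (fun s => s) false = [] := rfl

theorem dropWhile_head_false {α : Type} (p : α → Bool) (l : List α) (x : α) (xs : List α)
    (h : l.dropWhile p = x :: xs) : p x = false := by
  have := List.head?_dropWhile_not p l
  rw [h] at this
  simpa [sorted_nil_str] using this

-- main A-side invariant: A's flush loop from state (fl, il) equals the run fold from
-- (fl ++ sorted il, il ≠ []), provided il is only nonempty when L starts non-import
theorem runs_invariant (n : Nat) : ∀ L : List String, L.length ≤ n → ∀ fl il : List String,
    (il ≠ [] → ∀ x xs, L = x :: xs → isImportB x = false) →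
    finishA (L.foldl fixStepA (fl, il)) =
      ((groupRuns L).foldl stepB
        (fl ++ PySem.List.sorted il (fun s => s) false, !il.isEmpty)).1 := by
  induction n with
  | zero =>
    intro L hL fl il _
    have : L = [] := List.length_eq_zero_iff.mp (Nat.le_zero.mp hL)
    subst this
    simp only [List.foldl_nil, groupRuns, finishA]
    cases il <;> simp [PySem.List.sorted_eq_nil_iff]
  | succ n ih =>
    intro L hL fl il hil
    cases L with
    | nil =>
      simp only [List.foldl_nil, groupRuns, finishA]
      cases il <;> simp [PySem.List.sorted_eq_nil_iff]
    | cons x xs =>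
      by_cases hx : isImportB x = true
      · -- import run
        have hile : il = [] := by
          by_contra hne
          have := hil hne x xs rfl
          rw [hx] at this; exact Bool.false_ne_true this.symm
        subst hile
        have hsplit : x :: xs =
            (x :: xs.takeWhile (fun y => isImportB y == true)) ++
              xs.dropWhile (fun y => isImportB y == true) := by
          simp [List.takeWhile_append_dropWhile]
        have hruns : groupRuns (x :: xs) =
            (true, x :: xs.takeWhile (fun y => isImportB y == true)) ::
              groupRuns (xs.dropWhile (fun y => isImportB y == true)) := by
          conv_lhs => rw [groupRuns]
          rw [hx]
        set run := xs.takeWhile (fun y => isImportB y == true) with hrun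
        set rest := xs.dropWhile (fun y => isImportB y == true) with hrest
        have hall : ∀ y ∈ x :: run, isImportB y = true := by
          intro y hy
          rcases List.mem_cons.mp hy with h | h
          · subst h; exact hx
          · have := List.mem_takeWhile_imp h
            simpa [sorted_nil_str] using this
        have hfold : (x :: xs).foldl fixStepA (fl, []) =
            rest.foldl fixStepA (fl, (x :: run).filterMap cleanB) := by
          conv_lhs => rw [hsplit]
          rw [List.foldl_append, foldl_import_run (x :: run) fl [] hall]
          simp
        rw [hfold, hruns]
        have hlen : rest.length ≤ n := by
          rw [hrest]
          have h1 := List.length_dropWhile_le (fun y => isImportB y == true) xs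
          have h2 : xs.length ≤ n := by simpa using Nat.le_of_succ_le_succ hL
          omega
        have hhead : ((x :: run).filterMap cleanB ≠ []) →
            ∀ z zs, rest = z :: zs → isImportB z = false := by
          intro _ z zs hz
          have := dropWhile_head_false (fun y => isImportB y == true) xs z zs hz
          simpa [sorted_nil_str] using this
        rw [ih rest hlen fl ((x :: run).filterMap cleanB) hhead]
        -- match the step on the import group
        have hemp : (PySem.List.sorted (List.filterMap cleanB (x :: run)) (fun s => s) false).isEmpty
            = (List.filterMap cleanB (x :: run)).isEmpty := by
          by_cases hcl : List.filterMap cleanB (x :: run) = []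
          · simp [hcl, sorted_nil_str]
          · have h2 : PySem.List.sorted (List.filterMap cleanB (x :: run)) (fun s => s) false ≠ [] :=
              fun hh => hcl ((PySem.List.sorted_eq_nil_iff _ _ _).mp hh)
            rw [List.isEmpty_eq_false_iff.mpr h2, List.isEmpty_eq_false_iff.mpr hcl]
        simp [stepB, sorted_nil_str, hemp]
      · -- non-import run
        have hx' : isImportB x = false := by simpa using hx
        have hsplit : x :: xs =
            (x :: xs.takeWhile (fun y => isImportB y == false)) ++
              xs.dropWhile (fun y => isImportB y == false) := by
          simp [List.takeWhile_append_dropWhile]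
        have hruns : groupRuns (x :: xs) =
            (false, x :: xs.takeWhile (fun y => isImportB y == false)) ::
              groupRuns (xs.dropWhile (fun y => isImportB y == false)) := by
          conv_lhs => rw [groupRuns]
          rw [hx']
        set run := xs.takeWhile (fun y => isImportB y == false) with hrun
        set rest := xs.dropWhile (fun y => isImportB y == false) with hrest
        have hallr : ∀ y ∈ run, isImportB y = false := by
          intro y hy
          have := List.mem_takeWhile_imp hy
          simpa [sorted_nil_str] using this
        have hfold : (x :: xs).foldl fixStepA (fl, il) =
            rest.foldl fixStepA
              ((if il.isEmpty then fl
                else fl ++ PySem.List.sorted il (fun s => s) false ++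
                  (if PySem.Str.strip x == "" then [] else [""])) ++ [x] ++ run, []) := by
          conv_lhs => rw [hsplit]
          rw [List.foldl_append, List.foldl_cons, fixStepA_nonimport fl il x hx',
            foldl_nonimport_run run _ hallr]
        rw [hfold, hruns]
        have hlen : rest.length ≤ n := by
          rw [hrest]
          have h1 := List.length_dropWhile_le (fun y => isImportB y == false) xs
          have h2 : xs.length ≤ n := by simpa using Nat.le_of_succ_le_succ hL
          omega
        rw [ih rest hlen _ [] (fun h _ _ _ => absurd rfl h)]
        -- match the step on the non-import group
        cases il with
        | nil => simp [stepB, sorted_nil_str, List.append_assoc]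
        | cons a as =>
          by_cases hs : (PySem.Str.strip x == "") = true
          · simp [stepB, sorted_nil_str, hs, List.append_assoc]
          · simp only [Bool.not_eq_true] at hs
            simp [stepB, sorted_nil_str, hs, List.append_assoc]

-- ===== B-side: characterize pass 1, the global sort, and pass 2 =====

def mkImp (a : Int) (c : String) : PvItem := toLex (a, toLex ((1 : Int), c))
def mkOth (li : String × Nat) : PvItem := toLex (((li.2 : Nat) : Int), toLex ((0 : Int), li.1))

-- the decorated items, run by run, before sorting
def blockItems : List String → Nat → List PvItem
  | [], _ => []
  | x :: xs, p =>
    let k := isImportB x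
    let run := x :: xs.takeWhile (fun y => isImportB y == k)
    (if k then (run.filterMap cleanB).map (mkImp (p : Int)) else (run.zipIdx p).map mkOth) ++
      blockItems (xs.dropWhile (fun y => isImportB y == k)) (p + run.length)
termination_by l => l.length
decreasing_by
  exact Nat.lt_succ_of_le (List.length_dropWhile_le _ _)

-- the same, each import run sorted
def sortedBlocks : List String → Nat → List PvItem
  | [], _ => []
  | x :: xs, p =>
    let k := isImportB x
    let run := x :: xs.takeWhile (fun y => isImportB y == k)
    (if k then (PySem.List.sorted (run.filterMap cleanB) (fun s => s) false).map (mkImp (p : Int))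
     else (run.zipIdx p).map mkOth) ++
      sortedBlocks (xs.dropWhile (fun y => isImportB y == k)) (p + run.length)
termination_by l => l.length
decreasing_by
  exact Nat.lt_succ_of_le (List.length_dropWhile_le _ _)

-- pass1step bridged to cleanB / the item constructors
theorem pass1step_import (items : List PvItem) (a : Option Int) (line : String) (i : Nat)
    (h : isImportB line = true) :
    pass1step (items, a) (line, i) =
      (items ++ ((cleanB line).toList).map (mkImp (a.getD (i : Int))), some (a.getD (i : Int))) := by
  unfold isImportB at h
  unfold pass1step cleanB mkImp
  simp only [h, if_true]
  cases a <;> split_ifs <;> simp_all [Option.getD]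

theorem pass1step_nonimport (items : List PvItem) (a : Option Int) (line : String) (i : Nat)
    (h : isImportB line = false) :
    pass1step (items, a) (line, i) = (items ++ [mkOth (line, i)], none) := by
  unfold isImportB at h
  unfold pass1step mkOth
  simp only [Bool.or_eq_false_iff] at h
  simp only [h.1, h.2, Bool.or_self, Bool.false_eq_true, if_false]

-- pass 1 over an all-import run with the anchor already set
theorem pass1_import_run (g : List String) :
    ∀ (i : Nat) (items : List PvItem) (a : Int), (∀ y ∈ g, isImportB y = true) →
    (g.zipIdx i).foldl pass1step (items, some a) =
      (items ++ (g.filterMap cleanB).map (mkImp a), some a) := by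
  induction g with
  | nil => intro i items a _; simp
  | cons y ys ih =>
    intro i items a hall
    have hy : isImportB y = true := hall y (by simp)
    simp only [List.zipIdx_cons, List.foldl_cons,
      pass1step_import items (some a) y i hy, Option.getD_some]
    rw [ih (i + 1) _ a (fun z hz => hall z (by simp [hz]))]
    cases hcy : cleanB y <;> simp [hcy]

-- pass 1 over an all-non-import run
theorem pass1_nonimport_run (g : List String) :
    ∀ (i : Nat) (items : List PvItem) (a : Option Int), (∀ y ∈ g, isImportB y = false) →
    (g.zipIdx i).foldl pass1step (items, a) =
      (items ++ (g.zipIdx i).map mkOth, if g.isEmpty then a else none) := by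
  induction g with
  | nil => intro i items a _; simp
  | cons y ys ih =>
    intro i items a hall
    have hy : isImportB y = false := hall y (by simp)
    simp only [List.zipIdx_cons, List.foldl_cons,
      pass1step_nonimport items a y i hy]
    rw [ih (i + 1) _ none (fun z hz => hall z (by simp [hz]))]
    cases ys <;> simp

-- pass 1 produces exactly the run-by-run decorated items
theorem pass1_blocks (n : Nat) : ∀ L : List String, L.length ≤ n →
    ∀ (p : Nat) (items : List PvItem) (a : Option Int),
    (∀ x xs, L = x :: xs → isImportB x = true → a = none) →
    ((L.zipIdx p).foldl pass1step (items, a)).1 = items ++ blockItems L p := by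
  induction n with
  | zero =>
    intro L hL p items a _
    have : L = [] := List.length_eq_zero_iff.mp (Nat.le_zero.mp hL)
    subst this
    simp [blockItems]
  | succ n ih =>
    intro L hL p items a ha
    cases L with
    | nil => simp [blockItems]
    | cons x xs =>
      by_cases hx : isImportB x = true
      · -- import run
        have hanone : a = none := ha x xs rfl hx
        subst hanone
        have hsplit : x :: xs =
            (x :: xs.takeWhile (fun y => isImportB y == true)) ++
              xs.dropWhile (fun y => isImportB y == true) := by
          simp [List.takeWhile_append_dropWhile]
        set run := xs.takeWhile (fun y => isImportB y == true) with hrun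
        set rest := xs.dropWhile (fun y => isImportB y == true) with hrest
        have hallr : ∀ y ∈ run, isImportB y = true := by
          intro y hy
          have := List.mem_takeWhile_imp hy
          simpa using this
        have hfold : ((x :: xs).zipIdx p).foldl pass1step (items, none) =
            (rest.zipIdx (p + (x :: run).length)).foldl pass1step
              (items ++ (((x :: run).filterMap cleanB).map (mkImp (p : Int))), some (p : Int)) := by
          conv_lhs => rw [hsplit]
          rw [List.zipIdx_append, List.foldl_append, List.zipIdx_cons, List.foldl_cons,
            pass1step_import items none x p hx,
            pass1_import_run run (p + 1) _ _ hallr]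
          cases hcx : cleanB x <;> simp [hcx, Option.getD]
        rw [hfold]
        have hlen : rest.length ≤ n := by
          rw [hrest]
          have h1 := List.length_dropWhile_le (fun y => isImportB y == true) xs
          have h2 : xs.length ≤ n := by simpa using Nat.le_of_succ_le_succ hL
          omega
        have hhead : ∀ z zs, rest = z :: zs → isImportB z = true → (some (p : Int) : Option Int) = none := by
          intro z zs hz hzi
          have := dropWhile_head_false (fun y => isImportB y == true) xs z zs hz
          simp [hzi] at this
        rw [ih rest hlen (p + (x :: run).length) _ _ hhead]
        conv_rhs => rw [blockItems]
        simp [hx, hrun, hrest, List.append_assoc]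
      · -- non-import run
        have hx' : isImportB x = false := by simpa using hx
        have hsplit : x :: xs =
            (x :: xs.takeWhile (fun y => isImportB y == false)) ++
              xs.dropWhile (fun y => isImportB y == false) := by
          simp [List.takeWhile_append_dropWhile]
        set run := xs.takeWhile (fun y => isImportB y == false) with hrun
        set rest := xs.dropWhile (fun y => isImportB y == false) with hrest
        have hallr : ∀ y ∈ x :: run, isImportB y = false := by
          intro y hy
          rcases List.mem_cons.mp hy with h | h
          · subst h; exact hx'
          · have := List.mem_takeWhile_imp h
            simpa using this
        have hfold : ((x :: xs).zipIdx p).foldl pass1step (items, a) =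
            (rest.zipIdx (p + (x :: run).length)).foldl pass1step
              (items ++ ((x :: run).zipIdx p).map mkOth, none) := by
          conv_lhs => rw [hsplit]
          rw [List.zipIdx_append, List.foldl_append,
            pass1_nonimport_run (x :: run) p items a hallr]
          simp
        rw [hfold]
        have hlen : rest.length ≤ n := by
          rw [hrest]
          have h1 := List.length_dropWhile_le (fun y => isImportB y == false) xs
          have h2 : xs.length ≤ n := by simpa using Nat.le_of_succ_le_succ hL
          omega
        rw [ih rest hlen (p + (x :: run).length) _ none (fun _ _ _ _ => rfl)]
        conv_rhs => rw [blockItems]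
        simp [hx', hrun, hrest, List.append_assoc]

-- lex-order helpers
theorem pvle_of_fst_lt (t u : PvItem) (h : (ofLex t).1 < (ofLex u).1) : t ≤ u :=
  Prod.Lex.le_iff.mpr (Or.inl h)

theorem pvle_mkImp (a : Int) (c d : String) (h : c ≤ d) : mkImp a c ≤ mkImp a d := by
  unfold mkImp
  exact Prod.Lex.le_iff.mpr (Or.inr ⟨rfl, Prod.Lex.le_iff.mpr (Or.inr ⟨rfl, h⟩)⟩)

theorem zipIdx_pairwise {α : Type} (l : List α) (n : Nat) :
    List.Pairwise (fun a b => a.2 < b.2) (l.zipIdx n) := by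
  induction l generalizing n with
  | nil => simp
  | cons x xs ih =>
    simp only [List.zipIdx_cons, List.pairwise_cons]
    refine ⟨fun a ha => ?_, ih (n + 1)⟩
    have := List.mem_zipIdx ha; omega

-- every item of sortedBlocks L p has first component ≥ p
theorem sortedBlocks_lb (n : Nat) : ∀ L : List String, L.length ≤ n → ∀ (p : Nat) t,
    t ∈ sortedBlocks L p → (p : Int) ≤ (ofLex t).1 := by
  induction n with
  | zero =>
    intro L hL p t ht
    have : L = [] := List.length_eq_zero_iff.mp (Nat.le_zero.mp hL)
    subst this
    simp [sortedBlocks] at ht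
  | succ n ih =>
    intro L hL p t ht
    cases L with
    | nil => simp [sortedBlocks] at ht
    | cons x xs =>
      rw [sortedBlocks] at ht
      set k := isImportB x with hk
      set run := x :: xs.takeWhile (fun y => isImportB y == k) with hrun
      set rest := xs.dropWhile (fun y => isImportB y == k) with hrest
      have hlen : rest.length ≤ n := by
        have h1 := List.length_dropWhile_le (fun y => isImportB y == k) xs
        have h2 : xs.length ≤ n := by simpa using Nat.le_of_succ_le_succ hL
        simp only [hrest]; omega
      rcases List.mem_append.mp ht with h | h
      · by_cases hki : k = true
        · rw [hki] at h; simp only [if_true] at h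
          rcases List.mem_map.mp h with ⟨c, _, rfl⟩
          simp [mkImp]
        · have : k = false := by simpa using hki
          rw [this] at h; simp only [Bool.false_eq_true, if_false] at h
          rcases List.mem_map.mp h with ⟨li, hli, rfl⟩
          have := List.mem_zipIdx (by exact hli)
          simp only [mkOth, ofLex_toLex]
          exact_mod_cast this.1
      · have := ih rest hlen (p + run.length) t h
        have hle : (p : Int) ≤ ((p + run.length : Nat) : Int) := by push_cast; omega
        exact le_trans hle this

-- sortedBlocks is ordered under the tuple order
theorem sortedBlocks_pairwise (n : Nat) : ∀ L : List String, L.length ≤ n → ∀ (p : Nat),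
    List.Pairwise (fun a b => a ≤ b) (sortedBlocks L p) := by
  induction n with
  | zero =>
    intro L hL p
    have : L = [] := List.length_eq_zero_iff.mp (Nat.le_zero.mp hL)
    subst this
    simp [sortedBlocks]
  | succ n ih =>
    intro L hL p
    cases L with
    | nil => simp [sortedBlocks]
    | cons x xs =>
      rw [sortedBlocks]
      set k := isImportB x with hk
      set run := x :: xs.takeWhile (fun y => isImportB y == k) with hrun
      set rest := xs.dropWhile (fun y => isImportB y == k) with hrest
      have hlen : rest.length ≤ n := by
        have h1 := List.length_dropWhile_le (fun y => isImportB y == k) xs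
        have h2 : xs.length ≤ n := by simpa using Nat.le_of_succ_le_succ hL
        simp only [hrest]; omega
      apply List.pairwise_append.mpr
      refine ⟨?_, ih rest hlen (p + run.length), ?_⟩
      · -- within the block
        by_cases hki : k = true
        · rw [hki]; simp only [if_true]
          apply List.pairwise_map.mpr
          have := PySem.List.sorted_pairwise (run.filterMap cleanB) (fun s => s) 
          exact this.imp (fun h => pvle_mkImp _ _ _ h)
        · have hkf : k = false := by simpa using hki
          rw [hkf]; simp only [Bool.false_eq_true, if_false]
          apply List.pairwise_map.mpr
          refine (zipIdx_pairwise run p).imp ?_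
          intro a b hab
          apply pvle_of_fst_lt
          simp only [mkOth, ofLex_toLex]
          exact_mod_cast hab
      · -- block elements precede everything in the rest
        intro t ht u hu
        have hub : (ofLex t).1 < ((p + run.length : Nat) : Int) := by
          by_cases hki : k = true
          · rw [hki] at ht; simp only [if_true] at ht
            rcases List.mem_map.mp ht with ⟨c, _, rfl⟩
            have : 0 < run.length := by rw [hrun]; simp
            simp only [mkImp, ofLex_toLex]
            push_cast; omega
          · have hkf : k = false := by simpa using hki
            rw [hkf] at ht; simp only [Bool.false_eq_true, if_false] at ht
            rcases List.mem_map.mp ht with ⟨li, hli, rfl⟩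
            have := List.mem_zipIdx (by exact hli)
            simp only [mkOth, ofLex_toLex]
            push_cast; omega
        have hlb := sortedBlocks_lb n rest hlen (p + run.length) u hu
        exact pvle_of_fst_lt _ _ (lt_of_lt_of_le hub hlb)

-- sortedBlocks is a permutation of blockItems
theorem sortedBlocks_perm (n : Nat) : ∀ L : List String, L.length ≤ n → ∀ (p : Nat),
    (sortedBlocks L p).Perm (blockItems L p) := by
  induction n with
  | zero =>
    intro L hL p
    have : L = [] := List.length_eq_zero_iff.mp (Nat.le_zero.mp hL)
    subst this
    simp [sortedBlocks, blockItems]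
  | succ n ih =>
    intro L hL p
    cases L with
    | nil => simp [sortedBlocks, blockItems]
    | cons x xs =>
      rw [sortedBlocks, blockItems]
      set k := isImportB x with hk
      set run := x :: xs.takeWhile (fun y => isImportB y == k) with hrun
      set rest := xs.dropWhile (fun y => isImportB y == k) with hrest
      have hlen : rest.length ≤ n := by
        have h1 := List.length_dropWhile_le (fun y => isImportB y == k) xs
        have h2 : xs.length ≤ n := by simpa using Nat.le_of_succ_le_succ hL
        simp only [hrest]; omega
      refine List.Perm.append ?_ (ih rest hlen (p + run.length))
      by_cases hki : k = true
      · rw [hki]; simp only [if_true]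
        exact (PySem.List.sorted_perm (run.filterMap cleanB) (fun s => s) false).map _
      · have hkf : k = false := by simpa using hki
        rw [hkf]
        simp

-- the one global sort reorders each import run in place
theorem sort_blocks (L : List String) (p : Nat) :
    PySem.List.sorted (blockItems L p) (fun t => t) false = sortedBlocks L p :=
  PySem.List.sorted_id_eq_of_perm_of_pairwise _ _
    (sortedBlocks_perm L.length L le_rfl p)
    (sortedBlocks_pairwise L.length L le_rfl p)

-- pass 2 over a sorted import block: append it, pending = block nonempty (entered with pending = b)
theorem pass2_import_block (ts : List String) :
    ∀ (a : Int) (out : List String) (b : Bool),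
    (ts.map (mkImp a)).foldl pass2step (out, b) = (out ++ ts, if ts.isEmpty then b else true) := by
  induction ts with
  | nil => intro a out b; simp
  | cons c cs ih =>
    intro a out b
    simp only [List.map_cons, List.foldl_cons]
    have hstep : pass2step (out, b) (mkImp a c) = (out ++ [c], true) := by
      simp [pass2step, mkImp]
    rw [hstep, ih a (out ++ [c]) true]
    cases cs <;> simp

-- pass 2 over a non-import block with no pending imports: copy it
theorem pass2_nonimport_block (g : List String) :
    ∀ (i : Nat) (out : List String),
    (((g.zipIdx i).map mkOth)).foldl pass2step (out, false) = (out ++ g, false) := by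
  induction g with
  | nil => intro i out; simp
  | cons y ys ih =>
    intro i out
    simp only [List.zipIdx_cons, List.map_cons, List.foldl_cons]
    have hstep : pass2step (out, false) (mkOth (y, i)) = (out ++ [y], false) := by
      simp [pass2step, mkOth]
    rw [hstep, ih (i + 1) (out ++ [y])]
    simp

-- pass 2 over the sorted blocks is the per-run flush fold
theorem pass2_blocks (n : Nat) : ∀ L : List String, L.length ≤ n →
    ∀ (p : Nat) (out : List String) (b : Bool),
    (∀ x xs, L = x :: xs → isImportB x = true → b = false) →
    (sortedBlocks L p).foldl pass2step (out, b) = (groupRuns L).foldl stepB (out, b) := by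
  induction n with
  | zero =>
    intro L hL p out b _
    have : L = [] := List.length_eq_zero_iff.mp (Nat.le_zero.mp hL)
    subst this
    simp [sortedBlocks, groupRuns]
  | succ n ih =>
    intro L hL p out b hb
    cases L with
    | nil => simp [sortedBlocks, groupRuns]
    | cons x xs =>
      rw [sortedBlocks, groupRuns]
      by_cases hx : isImportB x = true
      · -- import run
        have hbf : b = false := hb x xs rfl hx
        subst hbf
        simp only [hx, if_true]
        set run := x :: xs.takeWhile (fun y => isImportB y == true) with hrun
        set rest := xs.dropWhile (fun y => isImportB y == true) with hrest
        have hlen : rest.length ≤ n := by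
          have h1 := List.length_dropWhile_le (fun y => isImportB y == true) xs
          have h2 : xs.length ≤ n := by simpa using Nat.le_of_succ_le_succ hL
          simp only [hrest]; omega
        rw [List.foldl_append, pass2_import_block _ _ out false, List.foldl_cons]
        have hstep : stepB (out, false) (true, run) =
            (out ++ PySem.List.sorted (run.filterMap cleanB) (fun s => s) false,
             !(PySem.List.sorted (run.filterMap cleanB) (fun s => s) false).isEmpty) := by
          simp [stepB]
        rw [hstep]
        have hiff : (if (PySem.List.sorted (run.filterMap cleanB) (fun s => s) false).isEmpty
              then false else true) =
            !(PySem.List.sorted (run.filterMap cleanB) (fun s => s) false).isEmpty := by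
          cases (PySem.List.sorted (run.filterMap cleanB) (fun s => s) false).isEmpty <;> rfl
        rw [hiff]
        apply ih rest hlen (p + run.length)
        intro z zs hz hzi
        have := dropWhile_head_false (fun y => isImportB y == true) xs z zs hz
        simp [hzi] at this
      · -- non-import run
        have hx' : isImportB x = false := by simpa using hx
        simp only [hx', Bool.false_eq_true, if_false]
        set run := xs.takeWhile (fun y => isImportB y == false) with hrun
        set rest := xs.dropWhile (fun y => isImportB y == false) with hrest
        have hlen : rest.length ≤ n := by
          have h1 := List.length_dropWhile_le (fun y => isImportB y == false) xs
          have h2 : xs.length ≤ n := by simpa using Nat.le_of_succ_le_succ hL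
          simp only [hrest]; omega
        rw [List.foldl_append, List.zipIdx_cons, List.map_cons, List.foldl_cons]
        have hstep : pass2step (out, b) (mkOth (x, p)) =
            ((if b && !(PySem.Str.strip x == "") then out ++ [""] else out) ++ [x], false) := by
          simp only [pass2step, mkOth, ofLex_toLex]
          norm_num
        rw [hstep, pass2_nonimport_block _ _ _, List.foldl_cons]
        have hstepB : stepB (out, b) (false, x :: run) =
            ((if b && !(PySem.Str.strip x == "") then out ++ [""] else out) ++ (x :: run), false) := by
          simp [stepB]
        rw [hstepB]
        have harr : (if b && !(PySem.Str.strip x == "") then out ++ [""] else out) ++ [x] ++ run =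
            (if b && !(PySem.Str.strip x == "") then out ++ [""] else out) ++ (x :: run) := by
          simp [List.append_assoc]
        rw [harr]
        exact ih rest hlen (p + (x :: run).length) _ false (fun _ _ _ _ => rfl)

-- ===== VERDICT (by name: the statement is the Claim_ definition above) =====
theorem fix_imports_spec : Claim_equal_fix_imports := by
  intro content _
  unfold Spec_fix_imports fix_imports fix_imports_alt
  set L := (PySem.Str.split? content "\n").getD [] with hL
  refine congrArg (PySem.Str.join "\n") ?_
  have hA := runs_invariant L.length L le_rfl [] [] (fun h _ _ _ => absurd rfl h)
  have hP1 := pass1_blocks L.length L le_rfl 0 [] none (fun _ _ _ _ => rfl)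
  rw [hP1, List.nil_append, sort_blocks L 0,
    pass2_blocks L.length L le_rfl 0 [] false (fun _ _ _ _ => rfl)]
  simpa [sorted_nil_str] using hA
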